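-- pv_equiv track=rewrite | github.com/richardycao/horseracing | parse/test_parse_data.py | apply_scratch
-- ===== SOURCE A (Python) =====
-- def apply_scratch(arr, scratched):
--     i = 0
--     result = []
--     for s in scratched:
--         if not s:
--             result.append(arr[i])
--             i += 1
--         else:
--             result.append('-')
--     return result
-- ===== SOURCE B (Python) =====
-- def apply_scratch(arr, scratched):
--     # Divide and conquer: split scratched at the midpoint; the left half consumes
--     # the first k entries of arr, where k is the left half's non-scratched count,
--     # and the right half consumes the rest. Depth is O(log n) instead of a linear scan.
--     n = len(scratched)
--     if n == 0:
--         return []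
--     if n == 1:
--         return ['-'] if scratched[0] else [arr[0]]
--     mid = n // 2
--     left = scratched[:mid]
--     k = sum(1 for s in left if not s)
--     return apply_scratch(arr[:k], left) + apply_scratch(arr[k:], scratched[mid:])
-- ===== Notes on version B (the rewrite author's own statement) =====
-- stated objective: alternative
-- what changed: Replaces A's single left-to-right scan with an inline counter by a divide-and-conquer recursion: split scratched at the midpoint, route the first k (= non-scratched count of the left half) elements of arr to the left half, recurse on both halves and concatenate.
import Mathlib
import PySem

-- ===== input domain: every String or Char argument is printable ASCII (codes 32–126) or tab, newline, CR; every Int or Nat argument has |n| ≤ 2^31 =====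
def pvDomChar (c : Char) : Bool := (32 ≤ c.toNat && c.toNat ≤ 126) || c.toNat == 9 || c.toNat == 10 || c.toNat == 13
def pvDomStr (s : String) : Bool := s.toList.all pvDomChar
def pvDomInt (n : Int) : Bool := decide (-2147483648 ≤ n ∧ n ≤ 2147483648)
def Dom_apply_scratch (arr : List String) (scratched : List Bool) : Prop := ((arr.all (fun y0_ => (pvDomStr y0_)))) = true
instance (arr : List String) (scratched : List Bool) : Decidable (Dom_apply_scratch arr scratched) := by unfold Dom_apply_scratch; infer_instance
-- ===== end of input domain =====

-- B replaces A's single left-to-right scan with a divide-and-conquer split of `scratched`,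
-- routing the first k (= non-scratched count of the left half) entries of arr left (not faster; a different algorithm).

-- ===== PORT A =====
-- A's loop body over `scratched`, carrying (i, result); `arr[i]` is pyGet? (Pre_ excludes the
-- IndexError case, where pyGet? is none and we default to "").
def pvStepA (arr : List String) (st : Int × List String) (s : Bool) : Int × List String :=
  if !s then (st.1 + 1, st.2 ++ [(PySem.List.pyGet? arr st.1).getD ""])
  else (st.1, st.2 ++ ["-"])

def apply_scratch (arr : List String) (scratched : List Bool) : List String :=
  (scratched.foldl (pvStepA arr) (0, [])).2

-- ===== PORT B =====
-- Transliteration of Source B's divide and conquer. Nonnegative in-range slices xs[:m], xs[m:]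
-- are exactly List.take / List.drop; n // 2 on a Nat length is Nat division (Python floordiv
-- agrees on nonnegative operands); `sum(1 for s in left if not s)` is countP (!·);
-- scratched[0] / arr[0] are pyGet? (Pre_ excludes the IndexError case, default as in port A).
def apply_scratch_alt (arr : List String) (scratched : List Bool) : List String :=
  if scratched.length = 0 then []
  else if scratched.length = 1 then
    if (PySem.List.pyGet? scratched 0).getD false then ["-"]
    else [(PySem.List.pyGet? arr 0).getD ""]
  else
    let mid := scratched.length / 2
    let left := scratched.take mid
    let k := left.countP (fun s => !s)
    apply_scratch_alt (arr.take k) left ++ apply_scratch_alt (arr.drop k) (scratched.drop mid)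
termination_by scratched.length
decreasing_by
  · simp; omega
  · simp; omega

-- ===== PRECONDITION & SPEC =====
-- Pre_ excludes exactly the inputs where Python A raises IndexError: fewer entries in arr
-- than non-scratched slots.
def Pre_apply_scratch (arr : List String) (scratched : List Bool) : Prop :=
  scratched.countP (fun s => !s) ≤ arr.length
instance (arr : List String) (scratched : List Bool) : Decidable (Pre_apply_scratch arr scratched) := by unfold Pre_apply_scratch; infer_instance
def pvWitness_apply_scratch : List String × List Bool := (["a", "b"], [false, true, false])

def Spec_apply_scratch (arr : List String) (scratched : List Bool) (out : List String) : Prop := out = apply_scratch_alt arr scratched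
instance (arr : List String) (scratched : List Bool) (out : List String) : Decidable (Spec_apply_scratch arr scratched out) := by unfold Spec_apply_scratch; infer_instance

-- ===== CLAIM (what is proved, stated in full; the proofs are below) =====
def Claim_equal_apply_scratch : Prop := ∀ (arr : List String) (scratched : List Bool), Dom_apply_scratch arr scratched → Pre_apply_scratch arr scratched → Spec_apply_scratch arr scratched (apply_scratch arr scratched)

-- ===== LEMMAS AND PROOFS =====

-- reference recursion both ports are reduced to
def pvCore : List String → List Bool → List String
  | _, [] => []
  | d, true :: rest => "-" :: pvCore d rest
  | d, false :: rest => (d.head?.getD "") :: pvCore d.tail rest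

-- pvCore splits at any point of the bool list, routing the left half's non-scratched count of arr left
theorem core_append (l : List Bool) : ∀ (r : List Bool) (arr : List String),
    pvCore arr (l ++ r)
      = pvCore (arr.take (l.countP (fun s => !s))) l
        ++ pvCore (arr.drop (l.countP (fun s => !s))) r := by
  induction l with
  | nil => intro r arr; simp [pvCore]
  | cons s l' ih =>
    intro r arr
    cases s with
    | true => simpa [pvCore] using ih r arr
    | false =>
      have hcount : ((false :: l').countP (fun s => !s)) = l'.countP (fun s => !s) + 1 := by
        simp
      rw [List.cons_append]
      show (arr.head?.getD "") :: pvCore arr.tail (l' ++ r) = _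
      rw [ih r arr.tail, hcount]
      have h1 : (arr.take (l'.countP (fun s => !s) + 1)).head? = arr.head? := by
        cases arr <;> simp
      have h2 : (arr.take (l'.countP (fun s => !s) + 1)).tail
          = arr.tail.take (l'.countP (fun s => !s)) := by
        cases arr <;> simp
      have h3 : arr.drop (l'.countP (fun s => !s) + 1)
          = arr.tail.drop (l'.countP (fun s => !s)) := by
        cases arr <;> simp
      show _ = pvCore (arr.take (l'.countP (fun s => !s) + 1)) (false :: l') ++ _
      rw [show ∀ d, pvCore d (false :: l') = (d.head?.getD "") :: pvCore d.tail l'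
            from fun d => rfl, h1, h2, h3, List.cons_append]

theorem pyGet_zero_head {α : Type} (xs : List α) :
    PySem.List.pyGet? xs (0 : Int) = xs.head? := by
  cases xs <;> simp [PySem.List.pyGet?, PySem.List.pyIdx?]

theorem alt_eq_core_aux : ∀ (n : Nat) (scratched : List Bool), scratched.length ≤ n →
    ∀ (arr : List String), apply_scratch_alt arr scratched = pvCore arr scratched := by
  intro n
  induction n with
  | zero =>
    intro s hs arr
    have h0 : s = [] := by cases s with | nil => rfl | cons a t => simp at hs
    subst h0
    rw [apply_scratch_alt]; simp [pvCore]
  | succ n ih =>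
    intro s hs arr
    rw [apply_scratch_alt]
    by_cases h0 : s.length = 0
    · rw [List.length_eq_zero_iff] at h0; subst h0; simp [pvCore]
    · rw [if_neg h0]
      by_cases h1 : s.length = 1
      · obtain ⟨x, hx⟩ : ∃ x, s = [x] := by
          cases s with
          | nil => simp at h1
          | cons a t =>
            cases t with
            | nil => exact ⟨a, rfl⟩
            | cons b u => simp at h1
        subst hx
        rw [if_pos h1]
        cases x <;> simp [pyGet_zero_head, pvCore]
      · rw [if_neg h1]
        have hm : 1 ≤ s.length / 2 ∧ s.length / 2 < s.length := by omega
        show apply_scratch_alt (arr.take ((s.take (s.length / 2)).countP (fun s => !s)))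
              (s.take (s.length / 2))
            ++ apply_scratch_alt (arr.drop ((s.take (s.length / 2)).countP (fun s => !s)))
              (s.drop (s.length / 2)) = pvCore arr s
        rw [ih (s.take (s.length / 2)) (by simp; omega) ,
            ih (s.drop (s.length / 2)) (by simp; omega),
            ← core_append, List.take_append_drop]

theorem alt_eq_core (arr : List String) (scratched : List Bool) :
    apply_scratch_alt arr scratched = pvCore arr scratched :=
  alt_eq_core_aux scratched.length scratched le_rfl arr

theorem a_loop_eq_core (scratched : List Bool) : ∀ (arr : List String) (i : Nat) (acc : List String),
    (scratched.foldl (pvStepA arr) ((i : Int), acc)).2 = acc ++ pvCore (arr.drop i) scratched := by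
  induction scratched with
  | nil => intro arr i acc; simp [pvCore]
  | cons s rest ih =>
    intro arr i acc
    cases s with
    | true =>
      rw [List.foldl_cons, show pvStepA arr ((i : Int), acc) true = ((i : Int), acc ++ ["-"])
        from rfl, ih arr i]
      simp [pvCore]
    | false =>
      rw [List.foldl_cons,
        show pvStepA arr ((i : Int), acc) false
          = (((i + 1 : Nat) : Int), acc ++ [(PySem.List.pyGet? arr (i : Int)).getD ""]) by
          simp only [pvStepA, Bool.not_false]; push_cast; ring_nf,
        ih arr (i + 1)]
      have hget : (PySem.List.pyGet? arr (i : Int)).getD "" = ((arr.drop i).head?.getD "") := by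
        rw [PySem.List.pyGet?_natCast, List.head?_drop]
      rw [hget, List.tail_drop.symm]
      show _ = acc ++ ((arr.drop i).head?.getD "" :: pvCore (arr.drop i).tail rest)
      simp

theorem a_eq_core (arr : List String) (scratched : List Bool) :
    apply_scratch arr scratched = pvCore arr scratched := by
  have h := a_loop_eq_core scratched arr 0 []
  simpa [apply_scratch] using h

-- ===== VERDICT (by name: the statement is the Claim_ definition above) =====
theorem apply_scratch_spec : Claim_equal_apply_scratch := by
  intro arr scratched _ _
  unfold Spec_apply_scratch
  rw [a_eq_core, alt_eq_core]
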